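-- pv_equiv track=rewrite | github.com/gchang12/Think-Python---Exercises | Chapter 9 - Part II.py | check_six
-- ===== SOURCE A (Python) =====
-- def check_six(word):
--     """This function checks to see if a word has three consecutive pairs of matching letters."""
--     word=word.lower()
--     #The condition fails immediately if the word has fewer than six letters.
--     if len(word)<6:
--         return False
--     else:
--         #The indexing is so we do not go out of range with the conditional on the next line.
--         for i in range(len(word)-5):
--             if word[i]==word[i+1] and word[i+2]==word[i+3] and word[i+4]==word[i+5]:
--                 return True
--     return False
-- ===== SOURCE B (Python) =====
-- def check_six(word):
--     """This function checks to see if a word has three consecutive pairs of matching letters."""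
--     w = word.lower()
--     pairs = {p for p in range(len(w) - 1) if w[p] == w[p + 1]}
--     return bool(pairs & {p - 2 for p in pairs} & {p - 4 for p in pairs})
-- ===== Notes on version B (the rewrite author's own statement) =====
-- stated objective: alternative
-- what changed: B builds the set of pair positions {p : w[p]==w[p+1]} once and detects three consecutive pairs by intersecting that set with its translates by -2 and -4 (nonempty intersection iff some p, p+2, p+4 are all pair positions), replacing A's length guard and six-character sliding-window scan.
import Mathlib
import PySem

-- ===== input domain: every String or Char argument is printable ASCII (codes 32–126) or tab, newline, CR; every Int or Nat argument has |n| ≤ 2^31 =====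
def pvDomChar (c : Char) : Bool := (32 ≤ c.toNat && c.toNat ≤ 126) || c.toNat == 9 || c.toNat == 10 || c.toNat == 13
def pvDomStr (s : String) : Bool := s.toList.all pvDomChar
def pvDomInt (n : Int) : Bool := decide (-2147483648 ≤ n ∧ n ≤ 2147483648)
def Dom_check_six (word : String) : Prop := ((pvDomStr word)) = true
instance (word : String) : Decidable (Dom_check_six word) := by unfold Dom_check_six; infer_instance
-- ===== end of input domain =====

-- B replaces A's length guard and six-character sliding-window scan by the set of pair
-- positions intersected with its translates by -2 and -4 (alternative algorithm, same cost).

-- ===== PORT A =====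
-- A: lowercase, guard len<6, then for i in range(len-5) test the six-char window.
def check_six (word : String) : Bool :=
  let l := (PySem.Str.lower word).toList
  if l.length < 6 then false
  else (List.range (l.length - 5)).any (fun i =>
    l.getD i ' ' == l.getD (i+1) ' ' && l.getD (i+2) ' ' == l.getD (i+3) ' '
      && l.getD (i+4) ' ' == l.getD (i+5) ' ')

-- ===== PORT B =====
-- B: pairs = {p | w[p]==w[p+1]}; answer = bool(pairs & {p-2 for p in pairs} & {p-4 for p in pairs}).
def check_six_alt (word : String) : Bool :=
  let l := (PySem.Str.lower word).toList
  let pairs : PySem.Set Int := PySem.Set.ofList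
    (((List.range (l.length - 1)).filter
        (fun p => l.getD p ' ' == l.getD (p+1) ' ')).map Int.ofNat)
  !(PySem.Set.inter (PySem.Set.inter pairs
      (PySem.Set.ofList (pairs.map (fun p => p - 2))))
      (PySem.Set.ofList (pairs.map (fun p => p - 4)))).isEmpty

-- ===== PRECONDITION & SPEC =====
def Spec_check_six (word : String) (out : Bool) : Prop := out = check_six_alt word
instance (word : String) (out : Bool) : Decidable (Spec_check_six word out) := by unfold Spec_check_six; infer_instance

-- ===== CLAIM =====
def Claim_equal_check_six : Prop := ∀ (word : String), Dom_check_six word → Spec_check_six word (check_six word)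

-- ===== LEMMAS AND PROOFS =====

-- membership in B's pair-position set
theorem pv_mem_pairs (l : List Char) (x : Int) :
    x ∈ PySem.Set.ofList (((List.range (l.length - 1)).filter
        (fun p => l.getD p ' ' == l.getD (p+1) ' ')).map Int.ofNat)
      ↔ ∃ p : ℕ, p < l.length - 1 ∧ (l.getD p ' ' == l.getD (p+1) ' ') = true ∧ x = (p : Int) := by
  rw [PySem.Set.mem_ofList]
  simp only [List.mem_map, List.mem_filter, List.mem_range, Int.ofNat_eq_natCast]
  constructor
  · rintro ⟨p, ⟨hp, hP⟩, rfl⟩; exact ⟨p, hp, hP, rfl⟩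
  · rintro ⟨p, hp, hP, rfl⟩; exact ⟨p, ⟨hp, hP⟩, rfl⟩

-- the two ports agree for every character list
theorem pv_core (l : List Char) :
    (if l.length < 6 then false
     else (List.range (l.length - 5)).any (fun i =>
        l.getD i ' ' == l.getD (i+1) ' ' && l.getD (i+2) ' ' == l.getD (i+3) ' '
          && l.getD (i+4) ' ' == l.getD (i+5) ' '))
    = (let pairs : PySem.Set Int := PySem.Set.ofList
         (((List.range (l.length - 1)).filter
             (fun p => l.getD p ' ' == l.getD (p+1) ' ')).map Int.ofNat)
       !(PySem.Set.inter (PySem.Set.inter pairs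
           (PySem.Set.ofList (pairs.map (fun p => p - 2))))
           (PySem.Set.ofList (pairs.map (fun p => p - 4)))).isEmpty) := by
  rw [Bool.eq_iff_iff]
  constructor
  · intro h
    split_ifs at h with h6
    rw [List.any_eq_true] at h
    obtain ⟨i, hi, hP⟩ := h
    rw [List.mem_range] at hi
    simp only [Bool.and_eq_true] at hP
    obtain ⟨⟨h1, h2⟩, h3⟩ := hP
    simp only [Bool.not_eq_eq_eq_not, Bool.not_true, List.isEmpty_eq_false_iff, ne_eq]
    refine List.ne_nil_of_mem (a := (i : Int)) ?_
    rw [PySem.Set.mem_inter, PySem.Set.mem_inter, pv_mem_pairs, PySem.Set.mem_ofList]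
    refine ⟨⟨⟨i, by omega, h1, rfl⟩, ?_⟩, ?_⟩
    · simp only [List.mem_map]
      refine ⟨(i : Int) + 2, ?_, by ring⟩
      rw [pv_mem_pairs]
      exact ⟨i + 2, by omega, h2, by push_cast; ring⟩
    · rw [PySem.Set.mem_ofList]
      simp only [List.mem_map]
      refine ⟨(i : Int) + 4, ?_, by ring⟩
      rw [pv_mem_pairs]
      exact ⟨i + 4, by omega, h3, by push_cast; ring⟩
  · intro h
    simp only [Bool.not_eq_eq_eq_not, Bool.not_true, List.isEmpty_eq_false_iff, ne_eq] at h
    obtain ⟨x, hx⟩ := List.exists_mem_of_ne_nil _ h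
    rw [PySem.Set.mem_inter, PySem.Set.mem_inter] at hx
    obtain ⟨⟨hx0, hx2⟩, hx4⟩ := hx
    rw [pv_mem_pairs] at hx0
    obtain ⟨p, hp, hP0, rfl⟩ := hx0
    rw [PySem.Set.mem_ofList] at hx2 hx4
    simp only [List.mem_map] at hx2 hx4
    obtain ⟨q2, hq2, he2⟩ := hx2
    obtain ⟨q4, hq4, he4⟩ := hx4
    rw [pv_mem_pairs] at hq2 hq4
    obtain ⟨r2, hr2, hP2, hre2⟩ := hq2
    obtain ⟨r4, hr4, hP4, hre4⟩ := hq4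
    have hr2e : r2 = p + 2 := by omega
    have hr4e : r4 = p + 4 := by omega
    subst hr2e hr4e
    have h6 : ¬ l.length < 6 := by omega
    rw [if_neg h6, List.any_eq_true]
    exact ⟨p, by rw [List.mem_range]; omega,
      by simp only [Bool.and_eq_true]; exact ⟨⟨hP0, hP2⟩, hP4⟩⟩

-- ===== VERDICT =====
theorem check_six_spec : Claim_equal_check_six := by
  intro word _
  exact pv_core ((PySem.Str.lower word).toList)
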